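-- pv_equiv track=rewrite | github.com/maimunafaria/State_transition_Diagram_generated_by_LLM | Code/Scripts/build_manifest_from_pdf.py | build_manifest
-- ===== SOURCE A (Python) =====
-- def build_manifest(starts, page_count):
--     rows = []
--     for idx, start in enumerate(starts):
--         end_page = page_count if idx == len(starts) - 1 else starts[idx + 1]["page_start"] - 1
--         rows.append(
--             {
--                 "case_id": start["case_id"],
--                 "book": start["book"],
--                 "page_start": start["page_start"],
--                 "page_end": end_page,
--             }
--         )
--     return rows
-- ===== SOURCE B (Python) =====
-- def build_manifest(starts, page_count):
--     rows = []
--     end = page_count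
--     for start in reversed(starts):
--         rows.append(
--             {
--                 "case_id": start["case_id"],
--                 "book": start["book"],
--                 "page_start": start["page_start"],
--                 "page_end": end,
--             }
--         )
--         end = start["page_start"] - 1
--     rows.reverse()
--     return rows
-- ===== Notes on version B (the rewrite author's own statement) =====
-- stated objective: alternative
-- what changed: B traverses the starts in reverse carrying the current end page as an accumulator (initially page_count, updated to each start's page_start - 1), then reverses the built rows, eliminating A's index arithmetic and next-element lookahead entirely.
import Mathlib
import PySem

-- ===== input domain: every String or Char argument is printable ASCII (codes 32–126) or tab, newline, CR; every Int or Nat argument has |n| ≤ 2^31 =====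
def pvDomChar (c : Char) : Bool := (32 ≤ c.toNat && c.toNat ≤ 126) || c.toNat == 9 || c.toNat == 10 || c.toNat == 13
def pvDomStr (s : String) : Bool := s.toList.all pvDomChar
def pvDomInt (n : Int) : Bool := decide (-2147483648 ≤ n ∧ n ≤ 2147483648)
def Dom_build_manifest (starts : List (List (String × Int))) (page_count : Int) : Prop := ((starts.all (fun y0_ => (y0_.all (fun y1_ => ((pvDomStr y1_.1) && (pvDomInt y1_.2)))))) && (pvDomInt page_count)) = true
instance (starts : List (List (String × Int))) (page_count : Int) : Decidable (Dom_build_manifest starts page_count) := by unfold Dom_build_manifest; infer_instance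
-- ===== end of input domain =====

-- B traverses the starts in reverse carrying the current end page as an accumulator and
-- reverses the built rows, replacing A's indexed loop with next-element lookahead (objective: alternative).

-- dict lookup d[k] on an association list (first match); the `none` case is Python's
-- KeyError, excluded by Pre_build_manifest, so the .getD 0 default is never claimed about.
def pvGetI (d : List (String × Int)) (k : String) : Int :=
  ((d.find? (fun p => p.1 == k)).map (·.2)).getD 0

-- ===== PORT A =====
def build_manifest (starts : List (List (String × Int))) (page_count : Int) : List (List (String × Int)) :=
  (PySem.List.enumerate starts).foldl
    (fun rows p =>
      let idx := p.1
      let start := p.2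
      let end_page : Int :=
        if idx == (starts.length : Int) - 1 then page_count
        else pvGetI ((PySem.List.pyGet? starts (idx + 1)).getD []) "page_start" - 1
      rows ++ [[("case_id", pvGetI start "case_id"), ("book", pvGetI start "book"),
                ("page_start", pvGetI start "page_start"), ("page_end", end_page)]])
    []

-- ===== PORT B =====
def build_manifest_alt (starts : List (List (String × Int))) (page_count : Int) : List (List (String × Int)) :=
  let st :=
    starts.reverse.foldl
      (fun (st : Int × List (List (String × Int))) start =>
        (pvGetI start "page_start" - 1,
         st.2 ++ [[("case_id", pvGetI start "case_id"), ("book", pvGetI start "book"),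
                   ("page_start", pvGetI start "page_start"), ("page_end", st.1)]]))
      (page_count, [])
  st.2.reverse

-- ===== PRECONDITION & SPEC =====
-- Pre_ excludes exactly the inputs where some start dict lacks one of the keys
-- "case_id"/"book"/"page_start": there Python A raises KeyError (and so does B).
def Pre_build_manifest (starts : List (List (String × Int))) (page_count : Int) : Prop :=
  ∀ s ∈ starts, ((s.find? (fun p => p.1 == "case_id")).isSome
    && (s.find? (fun p => p.1 == "book")).isSome
    && (s.find? (fun p => p.1 == "page_start")).isSome) = true
instance (starts : List (List (String × Int))) (page_count : Int) : Decidable (Pre_build_manifest starts page_count) := by unfold Pre_build_manifest; infer_instance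

def pvWitness_build_manifest : (List (List (String × Int))) × Int :=
  ([[("case_id", 1), ("book", 2), ("page_start", 3)],
    [("case_id", 4), ("book", 5), ("page_start", 9)]], 20)

def Spec_build_manifest (starts : List (List (String × Int))) (page_count : Int) (out : List (List (String × Int))) : Prop := out = build_manifest_alt starts page_count
instance (starts : List (List (String × Int))) (page_count : Int) (out : List (List (String × Int))) : Decidable (Spec_build_manifest starts page_count out) := by unfold Spec_build_manifest; infer_instance

-- ===== CLAIM (what is proved, stated in full; the proofs are below) =====
def Claim_equal_build_manifest : Prop := ∀ (starts : List (List (String × Int))) (page_count : Int), Dom_build_manifest starts page_count → Pre_build_manifest starts page_count → Spec_build_manifest starts page_count (build_manifest starts page_count)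

-- ===== LEMMAS AND PROOFS =====

-- the row both programs build, and the end page the row for `s` gets when `rest` follows it
def pvRow (s : List (String × Int)) (e : Int) : List (String × Int) :=
  [("case_id", pvGetI s "case_id"), ("book", pvGetI s "book"),
   ("page_start", pvGetI s "page_start"), ("page_end", e)]

def pvEnd (rest : List (List (String × Int))) (page_count : Int) : Int :=
  match rest with
  | [] => page_count
  | r :: _ => pvGetI r "page_start" - 1

-- B's foldl-over-reverse as a foldr
def pvF (starts : List (List (String × Int))) (page_count : Int) : Int × List (List (String × Int)) :=
  starts.foldr (fun start st => (pvGetI start "page_start" - 1, st.2 ++ [pvRow start st.1]))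
    (page_count, [])

theorem alt_eq_F (starts : List (List (String × Int))) (page_count : Int) :
    build_manifest_alt starts page_count = (pvF starts page_count).2.reverse := by
  unfold build_manifest_alt pvF pvRow
  rw [List.foldl_reverse]

theorem alt_cons (s : List (String × Int)) (rest : List (List (String × Int))) (page_count : Int) :
    build_manifest_alt (s :: rest) page_count
      = pvRow s (pvEnd rest page_count) :: build_manifest_alt rest page_count := by
  rw [alt_eq_F, alt_eq_F]
  have h1 : (pvF rest page_count).1 = pvEnd rest page_count := by
    cases rest with
    | nil => simp [pvF, pvEnd]
    | cons r rs => simp [pvF, pvEnd]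
  show ((pvF (s :: rest) page_count).2).reverse = _
  have : pvF (s :: rest) page_count
      = (pvGetI s "page_start" - 1, (pvF rest page_count).2 ++ [pvRow s (pvF rest page_count).1]) := by
    simp [pvF]
  rw [this, h1]
  simp

-- A as a map over the zip of starts with the end-page column
theorem A_eq_mapZip (starts : List (List (String × Int))) (page_count : Int) :
    build_manifest starts page_count
      = (starts.zip ((starts.drop 1).map (fun s => pvGetI s "page_start" - 1) ++ [page_count])).map
          (fun p => pvRow p.1 p.2) := by
  unfold build_manifest
  have hfold : ∀ (l : List (Int × List (String × Int))) (acc : List (List (String × Int))),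
      l.foldl (fun rows p =>
        rows ++ [[("case_id", pvGetI p.2 "case_id"), ("book", pvGetI p.2 "book"),
                  ("page_start", pvGetI p.2 "page_start"),
                  ("page_end", if p.1 == (starts.length : Int) - 1 then page_count
                    else pvGetI ((PySem.List.pyGet? starts (p.1 + 1)).getD []) "page_start" - 1)]]) acc
      = acc ++ l.map (fun p =>
          [("case_id", pvGetI p.2 "case_id"), ("book", pvGetI p.2 "book"),
           ("page_start", pvGetI p.2 "page_start"),
           ("page_end", if p.1 == (starts.length : Int) - 1 then page_count
             else pvGetI ((PySem.List.pyGet? starts (p.1 + 1)).getD []) "page_start" - 1)]) := by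
    intro l
    induction l with
    | nil => simp
    | cons x xs ih => intro acc; rw [List.foldl_cons, ih]; simp
  rw [hfold]
  simp only [List.nil_append]
  apply List.ext_getElem
  · simp [PySem.List.length_enumerate, List.length_zip]
    omega
  · intro j h1 h2
    simp only [List.getElem_map, PySem.List.getElem_enumerate, List.getElem_zip]
    have hj : j < starts.length := by simpa [PySem.List.length_enumerate] using h1
    unfold pvRow
    by_cases hlast : j = starts.length - 1
    · have hc : ((0 : Int) + (j : Int) == (starts.length : Int) - 1) = true := by
        simp; omega
      rw [hc]
      simp only [if_true]
      have hlen : ((starts.drop 1).map (fun s => pvGetI s "page_start" - 1)).length = starts.length - 1 := by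
        simp
      rw [List.getElem_append_right (by omega)]
      simp [hlast]
    · have hc : ¬ (((0 : Int) + (j : Int) == (starts.length : Int) - 1) = true) := by
        simp; omega
      rw [if_neg hc]
      have hjlt : j < starts.length - 1 := by omega
      rw [List.getElem_append_left (by simpa using hjlt)]
      have hcast : (0 : Int) + (j : Int) + 1 = ((j + 1 : Nat) : Int) := by push_cast; ring
      rw [hcast, PySem.List.pyGet?_natCast]
      have : starts[j + 1]? = some starts[j + 1] := List.getElem?_eq_getElem (by omega)
      simp [this]

theorem alt_eq_mapZip (starts : List (List (String × Int))) (page_count : Int) :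
    build_manifest_alt starts page_count
      = (starts.zip ((starts.drop 1).map (fun s => pvGetI s "page_start" - 1) ++ [page_count])).map
          (fun p => pvRow p.1 p.2) := by
  induction starts with
  | nil => simp [build_manifest_alt]
  | cons s rest ih =>
    rw [alt_cons, ih]
    cases rest with
    | nil => simp [pvEnd]
    | cons r rs => simp [pvEnd]

-- ===== VERDICT (by name: the statement is the Claim_ definition above) =====
theorem build_manifest_spec : Claim_equal_build_manifest := by
  intro starts page_count _ _
  unfold Spec_build_manifest
  rw [A_eq_mapZip, alt_eq_mapZip]
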